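-- pv_equiv track=rewrite | github.com/pypi-data/pypi-mirror-400 | packages/foodforthought-cli/foodforthought_cli-0.2.8.tar.gz/foodforthought_cli-0.2.8/ate/robot_setup.py | _count_core_servos
-- ===== SOURCE A (Python) =====
-- from typing import List, Dict, Optional, Any, Tuple, Callable
--
-- def _count_core_servos(servo_ids: List[int]) -> int:
--     """Count core servos by analyzing ID distribution.
--
--     Heuristics:
--     - IDs 0-15 are typically main actuators
--     - Look for gaps in ID sequence as boundaries
--     - Contiguous low IDs are more likely to be core actuators
--     """
--     if not servo_ids:
--         return 0
--
--     sorted_ids = sorted(servo_ids)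
--
--     # Count servos in the "core" range (0-15)
--     core_range_count = sum(1 for id in sorted_ids if id <= 15)
--
--     # Also look for the first significant gap (gap > 1)
--     last_id = -1
--     contiguous_count = 0
--     for id in sorted_ids:
--         if last_id >= 0 and id - last_id > 1:
--             # Found a gap - servos before this are likely core
--             break
--         contiguous_count += 1
--         last_id = id
--
--     # Use the more conservative estimate
--     return min(core_range_count, contiguous_count) if contiguous_count > 0 else core_range_count
-- ===== SOURCE B (Python) =====
-- def _count_core_servos(servo_ids):
--     if not servo_ids:
--         return 0
--     present = set(servo_ids)
--     core = sum(1 for x in servo_ids if x <= 15)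
--     start = min((x for x in present if x >= 0), default=None)
--     if start is None:
--         # every id is below the core range, so they are all core
--         return core
--     # climb the consecutive run that starts at the smallest nonnegative id
--     t = start
--     while t + 1 in present:
--         t += 1
--     contiguous = sum(1 for x in servo_ids if x <= t)
--     return min(core, contiguous)
-- ===== Notes on version B (the rewrite author's own statement) =====
-- stated objective: alternative
-- what changed: Replaces sort-then-linear-scan with a hash-set walk: take the smallest nonnegative id and climb consecutive integers through the set to find where the contiguous run ends, then count elements up to that point in one pass, avoiding the sort entirely.
import Mathlib
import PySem

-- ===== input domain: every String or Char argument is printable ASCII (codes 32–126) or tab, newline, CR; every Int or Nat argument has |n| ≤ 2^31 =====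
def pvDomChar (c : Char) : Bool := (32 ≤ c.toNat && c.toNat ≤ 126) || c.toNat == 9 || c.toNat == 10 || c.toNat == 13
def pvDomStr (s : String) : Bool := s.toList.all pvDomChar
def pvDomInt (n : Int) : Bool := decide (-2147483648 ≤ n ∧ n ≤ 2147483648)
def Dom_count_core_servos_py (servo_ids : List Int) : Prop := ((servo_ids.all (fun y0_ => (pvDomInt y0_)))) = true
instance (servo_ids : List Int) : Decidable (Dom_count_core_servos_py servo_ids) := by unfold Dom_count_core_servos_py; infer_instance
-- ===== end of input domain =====

-- B replaces A's sort-then-scan with a set walk (smallest nonnegative id, then climb consecutive integers): no sort needed.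

-- ===== PORT A =====
-- A's for-loop with `break`: state = (last_id, contiguous_count); `break` returns the count
def loopA : List Int → Int → Int → Int
  | [], _, cont => cont
  | id :: rest, last, cont =>
      if last ≥ 0 ∧ id - last > 1 then cont
      else loopA rest id (cont + 1)

def count_core_servos_py (servo_ids : List Int) : Int :=
  if servo_ids = [] then 0
  else
    let sorted_ids := PySem.List.sorted servo_ids (fun x => x) false
    let core_range_count : Int :=
      sorted_ids.foldl (fun acc id => if id ≤ 15 then acc + 1 else acc) 0
    let contiguous_count := loopA sorted_ids (-1) 0
    if contiguous_count > 0 then min core_range_count contiguous_count else core_range_count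

-- ===== PORT B =====
-- termination measure for the `while t + 1 in present` walk (cited by runEnd's decreasing_by)
theorem runEnd_measure_lt (l : List Int) (t : Int) (h : (t + 1) ∈ l) :
    (l.filter (fun x => decide (t + 1 < x))).length < (l.filter (fun x => decide (t < x))).length := by
  induction l with
  | nil => simp at h
  | cons a l ih =>
    simp only [List.mem_cons] at h
    simp only [List.filter_cons]
    by_cases ha : a = t + 1
    · subst ha
      have hle : (l.filter (fun x => decide (t + 1 < x))).length ≤
          (l.filter (fun x => decide (t < x))).length := by
        simp only [← List.countP_eq_length_filter]
        apply List.countP_mono_left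
        intro a _ hp
        simp only [decide_eq_true_eq] at hp ⊢
        omega
      have e1 : (decide (t + 1 < t + 1)) = false := by simp
      have e2 : (decide (t < t + 1)) = true := by simp
      rw [e1, e2]
      simp only [Bool.false_eq_true, if_false, if_true, List.length_cons]
      omega
    · have h' : t + 1 ∈ l := by tauto
      have ihl := ih h'
      by_cases hb : t + 1 < a
      · have h2 : t < a := by omega
        simp only [hb, h2, decide_true, if_true, List.length_cons]
        omega
      · have e1 : (decide (t + 1 < a)) = false := by simpa using hb
        rw [e1]
        simp only [Bool.false_eq_true, if_false]
        by_cases h2 : t < a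
        · simp only [h2, decide_true, if_true, List.length_cons]; omega
        · have e2 : (decide (t < a)) = false := by simpa using h2
          rw [e2]
          simp only [Bool.false_eq_true, if_false]
          omega

-- the `while t + 1 in present` walk
def runEnd (present : List Int) (t : Int) : Int :=
  if h : (t + 1) ∈ present then runEnd present (t + 1) else t
termination_by (present.filter (fun x => t < x)).length
decreasing_by exact runEnd_measure_lt present t h

def count_core_servos_py_alt (servo_ids : List Int) : Int :=
  if servo_ids = [] then 0
  else
    let present : PySem.Set Int := PySem.Set.ofList servo_ids
    let core : Int := servo_ids.foldl (fun acc x => if x ≤ 15 then acc + 1 else acc) 0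
    match PySem.List.min? (present.filter (fun x => decide (0 ≤ x))) (fun x => x) with
    | none => core
    | some start =>
        let t := runEnd present start
        let contiguous : Int := servo_ids.foldl (fun acc x => if x ≤ t then acc + 1 else acc) 0
        min core contiguous

-- ===== PRECONDITION & SPEC =====
def Spec_count_core_servos_py (servo_ids : List Int) (out : Int) : Prop := out = count_core_servos_py_alt servo_ids
instance (servo_ids : List Int) (out : Int) : Decidable (Spec_count_core_servos_py servo_ids out) := by unfold Spec_count_core_servos_py; infer_instance

-- ===== CLAIM (what is proved, stated in full; the proofs are below) =====
def Claim_equal_count_core_servos_py : Prop := ∀ (servo_ids : List Int), Dom_count_core_servos_py servo_ids → Spec_count_core_servos_py servo_ids (count_core_servos_py servo_ids)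

-- ===== LEMMAS AND PROOFS =====

theorem runEnd_le (present : List Int) (t : Int) : t ≤ runEnd present t := by
  induction t using runEnd.induct present with
  | case1 t h ih => rw [runEnd, dif_pos h]; omega
  | case2 t h => rw [runEnd, dif_neg h]

theorem runEnd_mem (present : List Int) (t : Int) :
    ∀ i : Int, t < i → i ≤ runEnd present t → i ∈ present := by
  induction t using runEnd.induct present with
  | case1 t h ih =>
    intro i h1 h2
    rw [runEnd, dif_pos h] at h2
    rcases eq_or_lt_of_le (show t + 1 ≤ i by omega) with he | hl
    · exact he ▸ h
    · exact ih i hl h2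
  | case2 t h =>
    intro i h1 h2
    rw [runEnd, dif_neg h] at h2
    omega

theorem runEnd_succ_not_mem (present : List Int) (t : Int) :
    runEnd present t + 1 ∉ present := by
  induction t using runEnd.induct present with
  | case1 t h ih => rw [runEnd, dif_pos h]; exact ih
  | case2 t h => rw [runEnd, dif_neg h]; exact h

-- A's loop on an all-negative sorted list never breaks
theorem loopA_all_neg (s : List Int) : ∀ l c : Int, (∀ x ∈ s, x < 0) → l < 0 →
    loopA s l c = c + (s.length : Int) := by
  induction s with
  | nil => intro l c _ _; simp [loopA]
  | cons h rest ih =>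
    intro l c hneg hl
    have hh : h < 0 := hneg h (by simp)
    rw [loopA, if_neg (by omega : ¬ (l ≥ 0 ∧ h - l > 1))]
    rw [ih h (c + 1) (fun x hx => hneg x (List.mem_cons_of_mem _ hx)) hh]
    simp only [List.length_cons]
    push_cast
    ring

-- characterization of A's loop on a sorted list: it counts the elements ≤ T
theorem loopA_count (T t0 : Int) (ht0 : 0 ≤ t0) (ht0T : t0 ≤ T) :
    ∀ (s : List Int) (l c : Int),
      s.Pairwise (· ≤ ·) →
      (l < 0 ∨ (0 ≤ l ∧ t0 ≤ l ∧ l ≤ T ∧ ∀ x ∈ s, l ≤ x)) →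
      (∀ i : Int, l < i → t0 ≤ i → i ≤ T → i ∈ s) →
      (∀ x ∈ s, x < 0 ∨ t0 ≤ x) →
      (∀ x ∈ s, x ≤ T ∨ T + 2 ≤ x) →
      loopA s l c = c + (s.countP (fun x => x ≤ T) : Int) := by
  intro s
  induction s with
  | nil => intro l c _ _ _ _ _; simp [loopA]
  | cons h rest ih =>
    intro l c hpair hdisj hmem h0 h1
    have hhd : ∀ x ∈ rest, h ≤ x := by
      intro x hx; exact (List.pairwise_cons.mp hpair).1 x hx
    have hpair' : rest.Pairwise (· ≤ ·) := (List.pairwise_cons.mp hpair).2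
    rw [loopA]
    by_cases hbrk : l ≥ 0 ∧ h - l > 1
    · rw [if_pos hbrk]
      obtain ⟨hl0, hgap⟩ := hbrk
      rcases hdisj with hneg | ⟨_, ht0l, hlT, hls⟩
      · omega
      -- break: show every element of h :: rest exceeds T, so the count is 0
      have hhT : T < h := by
        by_contra hle
        rw [not_lt] at hle
        rcases eq_or_lt_of_le hlT with he | hlt
        · omega
        · have hi : (l + 1) ∈ h :: rest := hmem (l + 1) (by omega) (by omega) (by omega)
          rcases List.mem_cons.mp hi with he' | hr
          · omega
          · have := hhd _ hr; omega
      have : (h :: rest).countP (fun x => x ≤ T) = 0 := by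
        rw [List.countP_eq_zero]
        intro x hx
        rcases List.mem_cons.mp hx with he | hr
        · subst he; simp; omega
        · have := hhd _ hr; simp; omega
      rw [this]; simp
    · rw [if_neg hbrk]
      -- no break: h ≤ T
      have hhT : h ≤ T := by
        rcases h1 h (by simp) with hle | hge
        · exact hle
        · exfalso
          rcases hdisj with hneg | ⟨hl0, ht0l, hlT, hls⟩
          · have hi : t0 ∈ h :: rest := hmem t0 (by omega) le_rfl ht0T
            rcases List.mem_cons.mp hi with he | hr
            · omega
            · have := hhd _ hr; omega
          · have hlh : l ≤ h := hls h (by simp)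
            omega
      have ht0h : t0 ≤ h ∨ h < 0 := by
        rcases h0 h (by simp) with hn | ht; exact Or.inr hn; exact Or.inl ht
      rw [ih h (c + 1) hpair'
        (by
          rcases ht0h with ht | hn
          · exact Or.inr ⟨by omega, ht, hhT, hhd⟩
          · exact Or.inl hn)
        (by
          intro i hi1 hi2 hi3
          have hli : l < i := by
            rcases hdisj with hneg | ⟨hl0, ht0l, hlT, hls⟩
            · omega
            · have := hls h (by simp); omega
          rcases List.mem_cons.mp (hmem i hli hi2 hi3) with he | hr
          · omega
          · exact hr)
        (fun x hx => h0 x (List.mem_cons_of_mem _ hx))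
        (fun x hx => h1 x (List.mem_cons_of_mem _ hx))]
      have : (h :: rest).countP (fun x => x ≤ T) = rest.countP (fun x => x ≤ T) + 1 := by
        rw [List.countP_cons]
        simp [hhT]
      rw [this]
      push_cast
      ring

-- ===== VERDICT (by name: the statement is the Claim_ definition above) =====
theorem count_core_servos_py_spec : Claim_equal_count_core_servos_py := by
  intro servo_ids _
  unfold Spec_count_core_servos_py count_core_servos_py count_core_servos_py_alt
  by_cases hnil : servo_ids = []
  · simp [hnil]
  · rw [if_neg hnil, if_neg hnil]
    simp only [PySem.List.foldl_ite_add_one]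
    have hperm : (PySem.List.sorted servo_ids (fun x => x) false).Perm servo_ids :=
      PySem.List.sorted_perm servo_ids (fun x => x) false
    have hpair : (PySem.List.sorted servo_ids (fun x => x) false).Pairwise (· ≤ ·) := by
      have := PySem.List.sorted_pairwise servo_ids (fun x => x)
      simpa using this
    have hcore : ((PySem.List.sorted servo_ids (fun x => x) false).countP (fun x => x ≤ 15)) =
        servo_ids.countP (fun x => x ≤ 15) := hperm.countP_eq _
    rcases hmin : PySem.List.min? ((PySem.Set.ofList servo_ids).filter (fun x => decide (0 ≤ x)))
        (fun x => x) with _ | t0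
    · -- no nonnegative id: A's loop never breaks, and every id is ≤ 15, so both sides are the length
      have hallneg : ∀ x ∈ servo_ids, x < 0 := by
        have hset := (PySem.List.min?_eq_none_iff _ _).mp hmin
        intro x hx
        by_contra hge
        have hxset : x ∈ (PySem.Set.ofList servo_ids).filter (fun x => decide (0 ≤ x)) := by
          rw [List.mem_filter]
          exact ⟨(PySem.Set.mem_ofList _ _).mpr hx, by simpa using not_lt.mp hge⟩
        rw [hset] at hxset
        simp at hxset
      have hlen : (PySem.List.sorted servo_ids (fun x => x) false).length = servo_ids.length :=
        hperm.length_eq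
      have hloop := loopA_all_neg (PySem.List.sorted servo_ids (fun x => x) false) (-1) 0
        (fun x hx => hallneg x (hperm.mem_iff.mp hx)) (by omega)
      rw [hloop, hlen]
      have hpos : 0 < servo_ids.length := List.length_pos_iff.mpr hnil
      rw [if_pos (by omega)]
      have hcoreall : servo_ids.countP (fun x => x ≤ 15) = servo_ids.length := by
        rw [List.countP_eq_length]
        intro x hx
        have := hallneg x hx
        simp
        omega
      rw [hcore, hcoreall]
      simp
    · -- a nonnegative id exists: its minimum t0 starts the walk
      have ht0mem' : t0 ∈ (PySem.Set.ofList servo_ids).filter (fun x => decide (0 ≤ x)) :=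
        PySem.List.min?_mem hmin
      rw [List.mem_filter] at ht0mem'
      have ht0set : t0 ∈ PySem.Set.ofList servo_ids := ht0mem'.1
      have ht0 : 0 ≤ t0 := by simpa using ht0mem'.2
      have ht0ids : t0 ∈ servo_ids := (PySem.Set.mem_ofList _ _).mp ht0set
      have hmin' : ∀ y ∈ servo_ids, 0 ≤ y → t0 ≤ y := by
        intro y hy hy0
        have : y ∈ (PySem.Set.ofList servo_ids).filter (fun x => decide (0 ≤ x)) := by
          rw [List.mem_filter]
          exact ⟨(PySem.Set.mem_ofList _ _).mpr hy, by simpa using hy0⟩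
        exact PySem.List.min?_isMin hmin y this
      have hT0 : t0 ≤ runEnd (PySem.Set.ofList servo_ids) t0 :=
        runEnd_le (PySem.Set.ofList servo_ids) t0
      set T := runEnd (PySem.Set.ofList servo_ids) t0 with hTdef
      have hloop := loopA_count T t0 ht0 hT0 (PySem.List.sorted servo_ids (fun x => x) false)
        (-1) 0 hpair (Or.inl (by omega))
        (by
          intro i h1 h2 h3
          rw [hperm.mem_iff]
          rcases eq_or_lt_of_le h2 with he | hlt
          · exact he ▸ ht0ids
          · exact (PySem.Set.mem_ofList _ _).mp (runEnd_mem (PySem.Set.ofList servo_ids) t0 i hlt h3))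
        (by
          intro x hx
          by_cases hx0 : 0 ≤ x
          · exact Or.inr (hmin' x (hperm.mem_iff.mp hx) hx0)
          · exact Or.inl (by omega))
        (by
          intro x hx
          by_cases hxT : x ≤ T
          · exact Or.inl hxT
          · right
            by_contra hlt
            have hx1 : x = T + 1 := by omega
            exact runEnd_succ_not_mem (PySem.Set.ofList servo_ids) t0
              (hx1 ▸ (PySem.Set.mem_ofList _ _).mpr (hperm.mem_iff.mp hx)))
      have hcont : ((PySem.List.sorted servo_ids (fun x => x) false).countP (fun x => x ≤ T)) =
        servo_ids.countP (fun x => x ≤ T) := hperm.countP_eq _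
      rw [hloop, hcont]
      have hpos : 0 < servo_ids.countP (fun x => x ≤ T) :=
        List.countP_pos_iff.mpr ⟨t0, ht0ids, by simpa using le_trans (le_refl t0) hT0⟩
      rw [if_pos (by omega)]
      rw [hcore]
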